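-- pv_equiv track=rewrite | github.com/goncalobarias/Advent-of-Code | 2021/10/solution.py | point_checker
-- ===== SOURCE A (Python) =====
-- def point_checker(errors):
--     points = 0
--     for error in errors:
--         if error == ")":
--             points += 3
--         elif error == "]":
--             points += 57
--         elif error == "}":
--             points += 1197
--         else:
--             points += 25137
--
--     return points
-- ===== SOURCE B (Python) =====
-- def point_checker(errors):
--     errors = list(errors)
--     c1 = errors.count(")")
--     c2 = errors.count("]")
--     c3 = errors.count("}")
--     return 3 * c1 + 57 * c2 + 1197 * c3 + 25137 * (len(errors) - c1 - c2 - c3)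
-- ===== Notes on version B (the rewrite author's own statement) =====
-- stated objective: alternative
-- what changed: Replaces the per-element if/elif accumulation with three count() passes and one closed-form linear combination, the default 25137 branch becoming the leftover count.
import Mathlib
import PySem

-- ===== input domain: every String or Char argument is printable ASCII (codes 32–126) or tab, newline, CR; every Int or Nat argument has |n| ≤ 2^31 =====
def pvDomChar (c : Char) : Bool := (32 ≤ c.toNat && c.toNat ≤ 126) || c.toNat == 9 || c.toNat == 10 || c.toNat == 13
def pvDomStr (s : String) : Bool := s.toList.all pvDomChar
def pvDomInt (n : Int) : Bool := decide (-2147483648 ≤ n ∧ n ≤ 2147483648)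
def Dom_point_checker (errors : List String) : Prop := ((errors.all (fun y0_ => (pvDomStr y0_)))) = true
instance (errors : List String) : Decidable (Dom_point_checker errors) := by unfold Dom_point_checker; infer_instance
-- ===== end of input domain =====

-- B counts the three bracket kinds and combines them in a closed form instead of A's per-element if/elif accumulation.

-- ===== PORT A =====
def point_checker (errors : List String) : Int :=
  errors.foldl (fun points error =>
    if error = ")" then points + 3
    else if error = "]" then points + 57
    else if error = "}" then points + 1197
    else points + 25137) 0

-- ===== PORT B =====
def point_checker_alt (errors : List String) : Int :=
  let c1 : Int := PySem.List.count errors ")"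
  let c2 : Int := PySem.List.count errors "]"
  let c3 : Int := PySem.List.count errors "}"
  3 * c1 + 57 * c2 + 1197 * c3 + 25137 * ((errors.length : Int) - c1 - c2 - c3)

-- ===== PRECONDITION & SPEC =====
def Spec_point_checker (errors : List String) (out : Int) : Prop := out = point_checker_alt errors
instance (errors : List String) (out : Int) : Decidable (Spec_point_checker errors out) := by unfold Spec_point_checker; infer_instance

-- ===== CLAIM =====
def Claim_equal_point_checker : Prop := ∀ (errors : List String), Dom_point_checker errors → Spec_point_checker errors (point_checker errors)

-- ===== LEMMAS AND PROOFS =====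
theorem point_checker_foldl (errors : List String) (acc : Int) :
    errors.foldl (fun points error =>
      if error = ")" then points + 3
      else if error = "]" then points + 57
      else if error = "}" then points + 1197
      else points + 25137) acc = acc + point_checker_alt errors := by
  induction errors generalizing acc with
  | nil => simp [point_checker_alt, PySem.List.count]
  | cons h t ih =>
    simp only [List.foldl_cons, ih]
    simp only [point_checker_alt, PySem.List.count, List.count_cons, List.length_cons]
    by_cases h1 : h = ")"
    · subst h1; simp; omega
    · by_cases h2 : h = "]"
      · subst h2; simp; omega
      · by_cases h3 : h = "}"
        · subst h3; simp; omega
        · simp [h1, h2, h3]; omega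

-- ===== VERDICT =====
theorem point_checker_spec : Claim_equal_point_checker := by
  intro errors _
  unfold Spec_point_checker point_checker
  rw [point_checker_foldl]
  omega
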